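-- pv_equiv track=rewrite | github.com/crab-apple/aoc2025 | src/aoc2025/solvers/day06/parsing.py | find_breakpoints
-- ===== SOURCE A (Python) =====
-- def find_whitespace(line):
--     result = set()
--     for i in range(0, len(line)):
--         if line[i] == " ":
--             result.add(i)
--     return result
--
-- def find_breakpoints(problem_input):
--     lines = problem_input.splitlines()
--
--     # For sanity, verify that all lines have the same length
--     lengths = set(map(lambda l: len(l), lines))
--     if len(lengths) != 1:
--         raise Exception("Not all lines have the same length")
--
--     result = find_whitespace(lines[0])
--     for line in lines[1:]:
--         result = result.intersection(find_whitespace(line))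
--
--     return list(sorted(result))
-- ===== SOURCE B (Python) =====
-- def find_breakpoints(problem_input):
--     lines = problem_input.splitlines()
--
--     # For sanity, verify that all lines have the same length
--     lengths = set(map(lambda l: len(l), lines))
--     if len(lengths) != 1:
--         raise Exception("Not all lines have the same length")
--
--     width = len(lines[0])
--     return [c for c in range(width) if all(line[c] == " " for line in lines)]
-- ===== Notes on version B (the rewrite author's own statement) =====
-- stated objective: idiomatic
-- what changed: Column-major scan: for each column index, a short-circuiting all() over the lines replaces building a whitespace-index set per line and folding intersections; the result list is emitted in ascending order directly, with no set and no sort.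
import Mathlib
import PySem

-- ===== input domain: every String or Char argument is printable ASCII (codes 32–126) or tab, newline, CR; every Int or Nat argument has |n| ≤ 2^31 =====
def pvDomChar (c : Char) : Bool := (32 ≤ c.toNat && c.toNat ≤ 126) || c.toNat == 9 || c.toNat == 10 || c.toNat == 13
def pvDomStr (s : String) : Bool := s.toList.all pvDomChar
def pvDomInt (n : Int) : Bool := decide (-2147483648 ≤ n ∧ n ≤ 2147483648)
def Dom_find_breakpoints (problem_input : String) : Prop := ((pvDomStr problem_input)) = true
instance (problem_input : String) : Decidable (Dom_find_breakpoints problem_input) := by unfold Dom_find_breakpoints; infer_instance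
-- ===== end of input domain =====

-- B replaces A's per-line whitespace sets + intersection fold + sort by a column-major
-- scan that emits qualifying column indices in ascending order (objective: idiomatic).

-- ===== PORT A =====
-- find_whitespace(line): set of indices i with line[i] == " "
def find_whitespaceA (line : String) : PySem.Set Int :=
  (PySem.List.pyRange 0 (PySem.Str.len line)).foldl
    (fun s i => if PySem.Str.pyGet? line i == some ' ' then PySem.Set.add s i else s)
    PySem.Set.empty

def find_breakpoints (problem_input : String) : List Int :=
  let lines := PySem.Str.splitlines problem_input
  let lengths : PySem.Set Int := PySem.Set.ofList (lines.map (fun l => PySem.Str.len l))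
  if lengths.length ≠ 1 then []  -- Python raises Exception here; excluded by Pre_
  else
    -- lines[0]: lines is nonempty here (else lengths would be empty); headI is exact
    let r0 := find_whitespaceA lines.headI
    let r := (lines.drop 1).foldl (fun r line => PySem.Set.inter r (find_whitespaceA line)) r0
    PySem.List.sorted r (fun x => x)

-- ===== PORT B =====
def find_breakpoints_alt (problem_input : String) : List Int :=
  let lines := PySem.Str.splitlines problem_input
  let lengths : PySem.Set Int := PySem.Set.ofList (lines.map (fun l => PySem.Str.len l))
  if lengths.length ≠ 1 then []  -- Python raises Exception here; excluded by Pre_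
  else
    let width := PySem.Str.len lines.headI
    (PySem.List.pyRange 0 width).filter
      (fun c => lines.all (fun line => PySem.Str.pyGet? line c == some ' '))

-- ===== PRECONDITION & SPEC =====
-- A raises (and B raises identically) exactly when the input has no lines or lines of
-- differing lengths; Pre_ excludes exactly those inputs.
def Pre_find_breakpoints (problem_input : String) : Prop :=
  PySem.Str.splitlines problem_input ≠ [] ∧
  ∀ l ∈ PySem.Str.splitlines problem_input,
    PySem.Str.len l = PySem.Str.len (PySem.Str.splitlines problem_input).headI
instance (problem_input : String) : Decidable (Pre_find_breakpoints problem_input) := by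
  unfold Pre_find_breakpoints; infer_instance

def pvWitness_find_breakpoints : String := " x \n x "

def Spec_find_breakpoints (problem_input : String) (out : List Int) : Prop := out = find_breakpoints_alt problem_input
instance (problem_input : String) (out : List Int) : Decidable (Spec_find_breakpoints problem_input out) := by unfold Spec_find_breakpoints; infer_instance

-- ===== CLAIM (what is proved, stated in full; the proofs are below) =====
def Claim_equal_find_breakpoints : Prop := ∀ (problem_input : String), Dom_find_breakpoints problem_input → Pre_find_breakpoints problem_input → Spec_find_breakpoints problem_input (find_breakpoints problem_input)

-- ===== LEMMAS AND PROOFS =====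

-- membership in the fold building find_whitespace's set
lemma mem_foldl_add_if (xs : List Int) (p : Int → Bool) (s : PySem.Set Int) (i : Int) :
    i ∈ xs.foldl (fun s j => if p j then PySem.Set.add s j else s) s ↔
      i ∈ s ∨ (i ∈ xs ∧ p i = true) := by
  induction xs generalizing s with
  | nil => simp
  | cons x xs ih =>
    simp only [List.foldl_cons, List.mem_cons]
    by_cases hx : p x = true
    · rw [if_pos hx, ih, PySem.Set.mem_add]
      constructor
      · rintro ((h | rfl) | ⟨h, hp⟩)
        · exact .inl h
        · exact .inr ⟨.inl rfl, hx⟩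
        · exact .inr ⟨.inr h, hp⟩
      · rintro (h | ⟨(rfl | h), hp⟩)
        · exact .inl (.inl h)
        · exact .inl (.inr rfl)
        · exact .inr ⟨h, hp⟩
    · rw [if_neg hx, ih]
      constructor
      · rintro (h | ⟨h, hp⟩)
        · exact .inl h
        · exact .inr ⟨.inr h, hp⟩
      · rintro (h | ⟨(rfl | h), hp⟩)
        · exact .inl h
        · exact absurd hp hx
        · exact .inr ⟨h, hp⟩

lemma nodup_foldl_add_if (xs : List Int) (p : Int → Bool) (s : PySem.Set Int)
    (hs : s.Nodup) :
    (xs.foldl (fun s j => if p j then PySem.Set.add s j else s) s).Nodup := by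
  induction xs generalizing s with
  | nil => exact hs
  | cons x xs ih =>
    simp only [List.foldl_cons]
    apply ih
    split
    · exact PySem.Set.nodup_add s x hs
    · exact hs

lemma mem_find_whitespaceA (line : String) (i : Int) :
    i ∈ find_whitespaceA line ↔
      (0 ≤ i ∧ i < PySem.Str.len line) ∧ PySem.Str.pyGet? line i = some ' ' := by
  unfold find_whitespaceA
  rw [mem_foldl_add_if]
  simp [PySem.Set.empty, PySem.List.mem_pyRange_one, and_assoc]

lemma nodup_find_whitespaceA (line : String) : (find_whitespaceA line).Nodup := by
  unfold find_whitespaceA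
  exact nodup_foldl_add_if _ _ _ List.nodup_nil

-- membership in the intersection fold
lemma mem_foldl_inter (ls : List String) (s : PySem.Set Int) (i : Int) :
    i ∈ ls.foldl (fun r line => PySem.Set.inter r (find_whitespaceA line)) s ↔
      i ∈ s ∧ ∀ l ∈ ls, i ∈ find_whitespaceA l := by
  induction ls generalizing s with
  | nil => simp
  | cons x xs ih =>
    simp only [List.foldl_cons, ih, PySem.Set.mem_inter, List.mem_cons]
    constructor
    · rintro ⟨⟨hs, hx⟩, h⟩
      exact ⟨hs, by rintro l (rfl | hl); exact hx; exact h l hl⟩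
    · rintro ⟨hs, h⟩
      exact ⟨⟨hs, h x (.inl rfl)⟩, fun l hl => h l (.inr hl)⟩

lemma nodup_foldl_inter (ls : List String) (s : PySem.Set Int) (hs : s.Nodup) :
    (ls.foldl (fun r line => PySem.Set.inter r (find_whitespaceA line)) s).Nodup := by
  induction ls generalizing s with
  | nil => exact hs
  | cons x xs ih => exact ih _ (PySem.Set.nodup_inter _ _ hs)

-- a set built from a list whose elements are all equal has exactly one element iff nonempty
lemma ofList_length_one_iff (xs : List Int) :
    (PySem.Set.ofList xs).length = 1 → ∀ a ∈ xs, ∀ b ∈ xs, a = b := by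
  intro h a ha b hb
  obtain ⟨c, hc⟩ : ∃ c, PySem.Set.ofList xs = [c] := by
    match hm : PySem.Set.ofList xs with
    | [c] => exact ⟨c, rfl⟩
    | [] => rw [hm] at h; simp at h
    | _ :: _ :: _ => rw [hm] at h; simp at h
  have ha' := (PySem.Set.mem_ofList xs a).mpr ha
  have hb' := (PySem.Set.mem_ofList xs b).mpr hb
  rw [hc] at ha' hb'
  simp at ha' hb'; omega

-- ===== VERDICT (by name: the statement is the Claim_ definition above) =====
theorem find_breakpoints_spec : Claim_equal_find_breakpoints := by
  intro s _ hpre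
  unfold Spec_find_breakpoints find_breakpoints find_breakpoints_alt
  obtain ⟨hne, _⟩ := hpre
  cases hls : PySem.Str.splitlines s with
  | nil => exact absurd hls hne
  | cons l0 rest =>
    simp only [List.headI_cons, List.drop_one, List.tail_cons]
    split_ifs with h
    · rfl
    · push_neg at h
      have heq : ∀ l ∈ l0 :: rest, PySem.Str.len l = PySem.Str.len l0 := by
        intro l hl
        exact ofList_length_one_iff _ h (PySem.Str.len l) (List.mem_map_of_mem hl)
          (PySem.Str.len l0) (List.mem_map_of_mem List.mem_cons_self)
      apply PySem.List.sorted_eq_of_perm_of_pairwise_lt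
      · -- Perm: both Nodup with the same membership
        rw [List.perm_ext_iff_of_nodup
          (List.Nodup.filter _ (PySem.List.pairwise_lt_pyRange_one 0 _).nodup)
          (nodup_foldl_inter _ _ (nodup_find_whitespaceA _))]
        intro i
        rw [List.mem_filter, mem_foldl_inter, mem_find_whitespaceA,
            PySem.List.mem_pyRange_one]
        simp only [List.all_cons, Bool.and_eq_true, List.all_eq_true, beq_iff_eq]
        constructor
        · rintro ⟨⟨h0, hlt⟩, hsp0, hrest⟩
          refine ⟨⟨⟨h0, hlt⟩, hsp0⟩, ?_⟩
          intro l hl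
          rw [mem_find_whitespaceA]
          refine ⟨⟨h0, ?_⟩, hrest l hl⟩
          rw [heq l (List.mem_cons_of_mem _ hl)]
          exact hlt
        · rintro ⟨⟨⟨h0, hlt⟩, hsp0⟩, hrest⟩
          exact ⟨⟨h0, hlt⟩, hsp0, fun l hl => ((mem_find_whitespaceA l i).mp (hrest l hl)).2⟩
      · -- strictly increasing
        exact List.Pairwise.filter _ (PySem.List.pairwise_lt_pyRange_one 0 _)
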